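-- pv_equiv track=rewrite | github.com/yskang/AlgorithmPractice | baekjoon/python/number_card_2_10816.py | solution
-- ===== SOURCE A (Python) =====
-- from collections import defaultdict
--
-- def solution(n: int, ns: list, m: int, ms: list):
--     cards = defaultdict(lambda: 0)
--     for number in ns:
--         cards[number] += 1
--     ans = []
--     for number in ms:
--         ans.append(str(cards[number]))
--     return ' '.join(ans)
-- ===== SOURCE B (Python) =====
-- def solution(n: int, ns: list, m: int, ms: list):
--     sarr = sorted(ns)
--
--     def bisect_left(a, x):
--         lo, hi = 0, len(a)
--         while lo < hi:
--             mid = (lo + hi) // 2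
--             if a[mid] < x:
--                 lo = mid + 1
--             else:
--                 hi = mid
--         return lo
--
--     def bisect_right(a, x):
--         lo, hi = 0, len(a)
--         while lo < hi:
--             mid = (lo + hi) // 2
--             if x < a[mid]:
--                 hi = mid
--             else:
--                 lo = mid + 1
--         return lo
--
--     return ' '.join(str(bisect_right(sarr, q) - bisect_left(sarr, q)) for q in ms)
-- ===== Notes on version B (the rewrite author's own statement) =====
-- stated objective: alternative
-- what changed: Replaces the defaultdict frequency table with a sorted copy of ns plus hand-rolled binary searches: each query's count is bisect_right minus bisect_left on the sorted array.
import Mathlib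
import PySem

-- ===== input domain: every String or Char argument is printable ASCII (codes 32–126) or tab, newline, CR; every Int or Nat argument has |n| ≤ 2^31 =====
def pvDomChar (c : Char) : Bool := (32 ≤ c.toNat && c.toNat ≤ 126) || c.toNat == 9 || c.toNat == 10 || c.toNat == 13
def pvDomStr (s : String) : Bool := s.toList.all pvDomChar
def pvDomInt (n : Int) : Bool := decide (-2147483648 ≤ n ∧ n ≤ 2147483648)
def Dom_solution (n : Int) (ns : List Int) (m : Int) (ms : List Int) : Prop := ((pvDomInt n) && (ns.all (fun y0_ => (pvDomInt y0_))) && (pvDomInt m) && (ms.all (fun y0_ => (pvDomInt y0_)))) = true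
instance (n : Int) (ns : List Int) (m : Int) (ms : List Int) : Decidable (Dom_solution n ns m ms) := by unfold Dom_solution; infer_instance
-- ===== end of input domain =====

-- B replaces A's defaultdict frequency table by a sorted copy of ns and answers each query with
-- binary-search range bounds (bisect_right - bisect_left); a different data representation, not claimed faster.

-- ===== PORT A =====
def solution (n : Int) (ns : List Int) (m : Int) (ms : List Int) : String :=
  -- cards = defaultdict(lambda: 0); for number in ns: cards[number] += 1
  let cards : PySem.Dict Int Int :=
    ns.foldl (fun d number => d.insert number (d.getD number 0 + 1)) PySem.Dict.empty
  -- ans = []; for number in ms: ans.append(str(cards[number]))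
  let ans : List String :=
    ms.foldl (fun acc number => acc ++ [PySem.Int.toStr (cards.getD number 0)]) []
  PySem.Str.join " " ans

-- ===== PORT B =====
-- Source B's hand-written bisect_left/bisect_right loops ARE PySem.List.bisectLeft/bisectRight
-- (the same lo/hi midpoint loop, step for step); sorted(ns) is PySem.List.sorted.
def solution_alt (n : Int) (ns : List Int) (m : Int) (ms : List Int) : String :=
  let sarr := PySem.List.sorted ns (fun x => x) false
  PySem.Str.join " "
    (ms.map (fun q =>
      PySem.Int.toStr ((PySem.List.bisectRight sarr q : Int) - (PySem.List.bisectLeft sarr q : Int))))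

-- ===== PRECONDITION & SPEC =====
def Spec_solution (n : Int) (ns : List Int) (m : Int) (ms : List Int) (out : String) : Prop := out = solution_alt n ns m ms
instance (n : Int) (ns : List Int) (m : Int) (ms : List Int) (out : String) : Decidable (Spec_solution n ns m ms out) := by unfold Spec_solution; infer_instance

-- ===== CLAIM (what is proved, stated in full; the proofs are below) =====
def Claim_equal_solution : Prop := ∀ (n : Int) (ns : List Int) (m : Int) (ms : List Int), Dom_solution n ns m ms → Spec_solution n ns m ms (solution n ns m ms)

-- ===== LEMMAS AND PROOFS =====

-- On a sorted list, every index below bisectLeft holds an element < q and every index from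
-- bisectRight on holds one > q, so bisectLeft ≤ bisectRight.
theorem bisectLeft_le_bisectRight (l : List Int) (q : Int)
    (hs : l.Pairwise (fun a b => a ≤ b)) :
    PySem.List.bisectLeft l q ≤ PySem.List.bisectRight l q := by
  obtain ⟨hblen, hb1, hb2⟩ := PySem.List.bisectLeft_spec l q hs
  obtain ⟨hrlen, hr1, hr2⟩ := PySem.List.bisectRight_spec l q hs
  by_contra h
  push_neg at h
  have hj : PySem.List.bisectRight l q < l.length := lt_of_lt_of_le h hblen
  have h1 := hb1 _ hj h
  have h2 := hr2 _ hj (le_refl _)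
  omega

-- The count of q in a sorted list is exactly the width of the bisect range.
theorem bisect_range_count (l : List Int) (q : Int)
    (hs : l.Pairwise (fun a b => a ≤ b)) :
    l.count q = PySem.List.bisectRight l q - PySem.List.bisectLeft l q := by
  obtain ⟨hblen, hb1, hb2⟩ := PySem.List.bisectLeft_spec l q hs
  obtain ⟨hrlen, hr1, hr2⟩ := PySem.List.bisectRight_spec l q hs
  have hle := bisectLeft_le_bisectRight l q hs
  set a := PySem.List.bisectLeft l q with ha
  set b := PySem.List.bisectRight l q with hbdef
  -- l = take a ++ (middle) ++ drop b, middle = (l.drop a).take (b - a)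
  have hsplit : l = l.take a ++ ((l.drop a).take (b - a) ++ l.drop b) := by
    have h1 : (l.drop a).take (b - a) ++ (l.drop a).drop (b - a) = l.drop a :=
      List.take_append_drop _ _
    have h2 : (l.drop a).drop (b - a) = l.drop b := by
      rw [List.drop_drop]
      congr 1
      omega
    rw [h2] at h1
    rw [h1, List.take_append_drop]
  have hcount1 : (l.take a).count q = 0 := by
    rw [List.count_eq_zero]
    intro hmem
    obtain ⟨i, hi, hieq⟩ := List.mem_iff_getElem.mp hmem
    have hia : i < a := lt_of_lt_of_le hi (by simp [List.length_take])
    have hil : i < l.length := lt_of_lt_of_le hia hblen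
    have := hb1 i hil hia
    rw [List.getElem_take] at hieq
    omega
  have hcount3 : (l.drop b).count q = 0 := by
    rw [List.count_eq_zero]
    intro hmem
    obtain ⟨i, hi, hieq⟩ := List.mem_iff_getElem.mp hmem
    rw [List.getElem_drop] at hieq
    have hil : b + i < l.length := by
      have := List.length_drop (l := l) (i := b)
      omega
    have := hr2 (b + i) hil (by omega)
    omega
  have hmidlen : ((l.drop a).take (b - a)).length = b - a := by
    rw [List.length_take, List.length_drop]
    omega
  have hcount2 : ((l.drop a).take (b - a)).count q = b - a := by
    have hall : ∀ x ∈ (l.drop a).take (b - a), q = x := by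
      intro x hmem
      obtain ⟨i, hi, hieq⟩ := List.mem_iff_getElem.mp hmem
      rw [hmidlen] at hi
      rw [List.getElem_take, List.getElem_drop] at hieq
      have hil : a + i < l.length := by omega
      have h1 := hb2 (a + i) hil (by omega)
      have h2 := hr1 (a + i) hil (by omega)
      omega
    simpa [hmidlen] using List.count_eq_length.mpr hall
  calc l.count q
      = (l.take a ++ ((l.drop a).take (b - a) ++ l.drop b)).count q := by rw [← hsplit]
    _ = b - a := by
        rw [List.count_append, List.count_append, hcount1, hcount2, hcount3]
        omega

-- ===== VERDICT (by name: the statement is the Claim_ definition above) =====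
theorem solution_spec : Claim_equal_solution := by
  intro n ns m ms _
  unfold Spec_solution solution solution_alt
  simp only [PySem.List.foldl_append_singleton_eq_map, List.nil_append,
    PySem.Dict.getD_foldl_insert_add_one, PySem.Dict.getD_empty, zero_add]
  congr 1
  apply List.map_congr_left
  intro q _
  have hs : (PySem.List.sorted ns (fun x => x) false).Pairwise (fun a b => a ≤ b) :=
    PySem.List.sorted_pairwise ns (fun x => x)
  have hc := bisect_range_count (PySem.List.sorted ns (fun x => x) false) q hs
  have hle := bisectLeft_le_bisectRight (PySem.List.sorted ns (fun x => x) false) q hs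
  have hperm : (PySem.List.sorted ns (fun x => x) false).Perm ns :=
    PySem.List.sorted_perm ns (fun x => x) false
  have hcnt : (PySem.List.sorted ns (fun x => x) false).count q = ns.count q :=
    hperm.count_eq q
  congr 1
  omega
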